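-- pv_equiv track=rewrite | github.com/PAHdb/AmesPAHdbPythonSuite | amespahdbpythonsuite/geometry.py | __pcone_to_be
-- ===== SOURCE A (Python) =====
-- def __pcone_to_be(pcone_code: list[str]) -> str:
--     """Converts the PC-1 code of a PAH to its boundary-edge code.  By
--     Dr. Joseph E. Roser <Joseph.E.Roser@nasa.gov
--
--     """
--     becode = ""
--     csum = 0
--     x = pcone_code.index("1")
--     for item in pcone_code[x + 1:] + pcone_code[: x + 1]:
--         if item == "0":
--             csum += 1
--         else:
--             becode += str(csum + 1)
--             csum = 0
--     return becode
-- ===== SOURCE B (Python) =====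
-- def __pcone_to_be(pcone_code: list[str]) -> str:
--     x = pcone_code.index("1")
--     rotated = pcone_code[x + 1:] + pcone_code[: x + 1]
--     ds = [i for i, item in enumerate(rotated) if item != "0"]
--     return "".join(str(b - a) for a, b in zip([-1] + ds, ds))
-- ===== Notes on version B (the rewrite author's own statement) =====
-- stated objective: alternative
-- what changed: Replaces A's stateful accumulator loop (running zero-counter reset at each delimiter) by computing the delimiter positions once with enumerate+filter and joining the gaps between consecutive positions.
import Mathlib
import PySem

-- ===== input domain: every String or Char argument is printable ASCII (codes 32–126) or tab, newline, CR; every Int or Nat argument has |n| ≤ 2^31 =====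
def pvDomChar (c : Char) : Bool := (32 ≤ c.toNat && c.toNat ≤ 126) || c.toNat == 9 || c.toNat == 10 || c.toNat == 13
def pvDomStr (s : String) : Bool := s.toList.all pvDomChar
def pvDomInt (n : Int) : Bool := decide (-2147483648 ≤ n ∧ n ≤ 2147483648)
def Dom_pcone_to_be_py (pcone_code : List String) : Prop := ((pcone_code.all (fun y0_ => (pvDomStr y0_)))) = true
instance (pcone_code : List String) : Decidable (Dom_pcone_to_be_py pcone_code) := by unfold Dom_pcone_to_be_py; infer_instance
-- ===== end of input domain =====

-- B replaces A's running-counter accumulator loop by computing the delimiter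
-- positions once (enumerate + filter) and emitting the gaps between consecutive
-- positions (objective: alternative decomposition, same cost).

-- ===== PORT A =====
def pcone_to_be_py (pcone_code : List String) : String :=
  let x : Int := (((PySem.List.index? pcone_code "1").getD 0 : Nat) : Int)
  let rotated := PySem.List.slice pcone_code (some (x + 1)) none
               ++ PySem.List.slice pcone_code none (some (x + 1))
  (rotated.foldl (fun (st : String × Int) item =>
      if item == "0" then (st.1, st.2 + 1)
      else (st.1 ++ PySem.Int.toStr (st.2 + 1), 0)) ("", 0)).1

-- ===== PORT B =====
def pcone_to_be_py_alt (pcone_code : List String) : String :=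
  let x : Int := (((PySem.List.index? pcone_code "1").getD 0 : Nat) : Int)
  let rotated := PySem.List.slice pcone_code (some (x + 1)) none
               ++ PySem.List.slice pcone_code none (some (x + 1))
  let ds : List Int := (PySem.List.enumerate rotated).filterMap
      (fun p => if p.2 ≠ "0" then some p.1 else none)
  PySem.Str.join "" ((List.zip ((-1) :: ds) ds).map (fun p => PySem.Int.toStr (p.2 - p.1)))

-- ===== PRECONDITION & SPEC =====
-- Pre_ excludes inputs with no "1": there pcone_code.index("1") raises ValueError in A (and in B).
def Pre_pcone_to_be_py (pcone_code : List String) : Prop := "1" ∈ pcone_code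
instance (pcone_code : List String) : Decidable (Pre_pcone_to_be_py pcone_code) := by unfold Pre_pcone_to_be_py; infer_instance
def pvWitness_pcone_to_be_py : List String := ["0", "1", "0", "1"]

def Spec_pcone_to_be_py (pcone_code : List String) (out : String) : Prop := out = pcone_to_be_py_alt pcone_code
instance (pcone_code : List String) (out : String) : Decidable (Spec_pcone_to_be_py pcone_code out) := by unfold Spec_pcone_to_be_py; infer_instance

-- ===== CLAIM (what is proved, stated in full; the proofs are below) =====
def Claim_equal_pcone_to_be_py : Prop := ∀ (pcone_code : List String), Dom_pcone_to_be_py pcone_code → Pre_pcone_to_be_py pcone_code → Spec_pcone_to_be_py pcone_code (pcone_to_be_py pcone_code)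

-- ===== LEMMAS AND PROOFS =====

-- the numeric strings A's loop emits, as a list, starting from counter c
def pvPieces : List String → Int → List String
  | [], _ => []
  | h :: t, c => if h == "0" then pvPieces t (c + 1)
                 else PySem.Int.toStr (c + 1) :: pvPieces t 0

-- delimiter positions, enumerate starting at s
def pvDs (l : List String) (s : Int) : List Int :=
  (PySem.List.enumerate l s).filterMap (fun p => if p.2 ≠ "0" then some p.1 else none)

theorem pvDs_nil (s : Int) : pvDs [] s = [] := rfl

theorem pvDs_cons (h : String) (t : List String) (s : Int) :
    pvDs (h :: t) s = (if h ≠ "0" then [s] else []) ++ pvDs t (s + 1) := by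
  simp only [pvDs, PySem.List.enumerate_cons, List.filterMap_cons]
  split_ifs <;> simp_all

theorem pvJoin_empty_cons (a : List Char) (l : List (List Char)) :
    PySem.Chars.join [] (a :: l) = a ++ PySem.Chars.join [] l := by
  cases l with
  | nil => simp [PySem.Chars.join_singleton, PySem.Chars.join_nil]
  | cons b t => simp [PySem.Chars.join_cons_cons]

theorem pvStrJoin_empty_cons (a : String) (l : List String) :
    PySem.Str.join "" (a :: l) = a ++ PySem.Str.join "" l := by
  apply String.toList_injective
  simp [PySem.Str.toList_join, pvJoin_empty_cons]

theorem pvFoldA (l : List String) (acc : String) (c : Int) :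
    (l.foldl (fun (st : String × Int) item =>
        if item == "0" then (st.1, st.2 + 1)
        else (st.1 ++ PySem.Int.toStr (st.2 + 1), 0)) (acc, c)).1
      = acc ++ PySem.Str.join "" (pvPieces l c) := by
  induction l generalizing acc c with
  | nil => simp [pvPieces, PySem.Str.join]
  | cons h t ih =>
      by_cases hh : h = "0"
      · simpa [List.foldl, hh, pvPieces] using ih acc (c + 1)
      · simp only [List.foldl, beq_iff_eq, if_neg hh, pvPieces]
        rw [pvStrJoin_empty_cons, ← String.append_assoc]
        simpa using ih (acc ++ PySem.Int.toStr (c + 1)) 0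

theorem pvPieces_eq_gaps (l : List String) (s c : Int) :
    pvPieces l c
      = (List.zip ((s - 1 - c) :: pvDs l s) (pvDs l s)).map
          (fun p => PySem.Int.toStr (p.2 - p.1)) := by
  induction l generalizing s c with
  | nil => simp [pvPieces, pvDs_nil]
  | cons h t ih =>
      by_cases hh : h = "0"
      · simp only [pvPieces, hh, if_pos (by simp : (("0" : String) == "0") = true),
          pvDs_cons, ne_eq, not_true_eq_false, if_false, List.nil_append]
        rw [ih (s + 1) (c + 1)]
        have harith : s + 1 - 1 - (c + 1) = s - 1 - c := by ring
        rw [harith]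
      · simp only [pvPieces, if_neg (by simpa using hh : ¬ (h == "0") = true),
          pvDs_cons, ne_eq, hh, not_false_eq_true, if_true, List.singleton_append]
        rw [ih (s + 1) 0]
        have harith : s + 1 - 1 - 0 = s := by ring
        rw [harith, List.zip_cons_cons, List.map_cons]
        congr 2
        ring

-- ===== VERDICT (by name: the statement is the Claim_ definition above) =====
theorem pcone_to_be_py_spec : Claim_equal_pcone_to_be_py := by
  intro pcone_code _ _
  unfold Spec_pcone_to_be_py pcone_to_be_py pcone_to_be_py_alt
  rw [pvFoldA]
  have := pvPieces_eq_gaps (PySem.List.slice pcone_code (some ((((PySem.List.index? pcone_code "1").getD 0 : Nat) : Int) + 1)) none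
               ++ PySem.List.slice pcone_code none (some ((((PySem.List.index? pcone_code "1").getD 0 : Nat) : Int) + 1))) 0 0
  simp only [pvDs] at this
  rw [this]
  norm_num
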